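-- pv_equiv track=rewrite | github.com/Miri-Butel/general_havel_hakimi | graph_utils.py | degree_sequence_repr
-- ===== SOURCE A (Python) =====
-- def degree_sequence_repr(degrees):
--     """
--     Given a sorted degree sequence, returns a string like "[d] * r" for each group of repeated degrees.
--     Example: [4, 4, 3, 3, 3, 2] -> "[4] *2, [3] *3, [2] *1"
--     """
--     if not degrees:
--         return ""
--     result = []
--     prev = degrees[0]
--     count = 1
--     for d in degrees[1:]:
--         if d == prev:
--             count += 1
--         else:
--             result.append(f"[{prev}] *{count}")
--             prev = d
--             count = 1
--     result.append(f"[{prev}] *{count}")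
--     return ", ".join(result)
-- ===== SOURCE B (Python) =====
-- def degree_sequence_repr(degrees):
--     """Divide and conquer: run-length encode each half recursively, merging the boundary runs."""
--     def runs(lst):
--         if len(lst) <= 1:
--             return [(d, 1) for d in lst]
--         mid = len(lst) // 2
--         left, right = runs(lst[:mid]), runs(lst[mid:])
--         (lv, lc), (rv, rc) = left[-1], right[0]
--         if lv == rv:
--             return left[:-1] + [(lv, lc + rc)] + right[1:]
--         return left + right
--     return ", ".join(f"[{v}] *{c}" for v, c in runs(degrees))
-- ===== Notes on version B (the rewrite author's own statement) =====
-- stated objective: alternative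
-- what changed: Replaces A's single linear prev/count scan with a divide-and-conquer recursion: each half of the list is run-length encoded independently and the two run lists are merged at the boundary (combining the last run of the left with the first of the right when the values match), then all runs are formatted and joined.
import Mathlib
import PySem

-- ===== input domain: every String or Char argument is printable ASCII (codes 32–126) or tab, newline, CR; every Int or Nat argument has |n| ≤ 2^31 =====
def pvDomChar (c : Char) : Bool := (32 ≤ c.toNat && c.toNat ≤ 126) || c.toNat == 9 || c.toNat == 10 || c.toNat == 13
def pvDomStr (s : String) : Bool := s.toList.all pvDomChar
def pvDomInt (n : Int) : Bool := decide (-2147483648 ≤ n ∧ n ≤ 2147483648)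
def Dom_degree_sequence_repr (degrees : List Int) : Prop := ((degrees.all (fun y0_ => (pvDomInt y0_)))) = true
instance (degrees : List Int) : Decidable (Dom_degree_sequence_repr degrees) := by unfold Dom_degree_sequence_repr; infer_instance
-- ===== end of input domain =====

-- B replaces A's linear prev/count scan with a divide-and-conquer recursion (alternative algorithm, not claimed faster).

-- ===== PORT A =====
-- A: fold over degrees[1:] carrying (result, prev, count); flush a part on change and once at the end.
def degree_sequence_repr (degrees : List Int) : String :=
  match degrees with
  | [] => ""
  | d0 :: rest =>
    let s := rest.foldl
      (fun (st : List String × Int × Int) d =>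
        if d == st.2.1 then (st.1, st.2.1, st.2.2 + 1)
        else (st.1 ++ ["[" ++ PySem.Int.toStr st.2.1 ++ "] *" ++ PySem.Int.toStr st.2.2], d, 1))
      ([], d0, 1)
    PySem.Str.join ", " (s.1 ++ ["[" ++ PySem.Int.toStr s.2.1 ++ "] *" ++ PySem.Int.toStr s.2.2])

-- ===== PORT B =====
-- B's helper runs(lst): divide and conquer. Python's slices lst[:mid] / lst[mid:] with 0 ≤ mid ≤ len
-- are exactly take/drop; left[-1] / right[0] are read with a default that is unreachable (both halves
-- are nonempty), left[:-1] is dropLast, right[1:] is tail.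
def dcRuns (l : List Int) : List (Int × Int) :=
  if _h : l.length ≤ 1 then l.map (fun d => (d, (1 : Int)))
  else
    let mid := l.length / 2
    let left := dcRuns (l.take mid)
    let right := dcRuns (l.drop mid)
    let lp := left.getLastD (0, 0)
    let rp := right.headD (0, 0)
    if lp.1 == rp.1 then left.dropLast ++ [(lp.1, lp.2 + rp.2)] ++ right.tail
    else left ++ right
termination_by l.length
decreasing_by
  · simp only [List.length_take]; omega
  · simp only [List.length_drop]; omega

def degree_sequence_repr_alt (degrees : List Int) : String :=
  PySem.Str.join ", " ((dcRuns degrees).map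
    (fun vc => "[" ++ PySem.Int.toStr vc.1 ++ "] *" ++ PySem.Int.toStr vc.2))

-- ===== PRECONDITION & SPEC =====
def Spec_degree_sequence_repr (degrees : List Int) (out : String) : Prop := out = degree_sequence_repr_alt degrees
instance (degrees : List Int) (out : String) : Decidable (Spec_degree_sequence_repr degrees out) := by unfold Spec_degree_sequence_repr; infer_instance

-- ===== CLAIM (what is proved, stated in full; the proofs are below) =====
def Claim_equal_degree_sequence_repr : Prop := ∀ (degrees : List Int), Dom_degree_sequence_repr degrees → Spec_degree_sequence_repr degrees (degree_sequence_repr degrees)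

-- ===== LEMMAS AND PROOFS =====

def pvFmt (p c : Int) : String := "[" ++ PySem.Int.toStr p ++ "] *" ++ PySem.Int.toStr c

-- the run list A's accumulator fold produces, starting with an open run (prev, count)
def runsFrom (prev count : Int) : List Int → List (Int × Int)
  | [] => [(prev, count)]
  | d :: t => if d == prev then runsFrom prev (count + 1) t else (prev, count) :: runsFrom d 1 t

-- reference run list, via takeWhile/dropWhile
def runsB : List Int → List (Int × Int)
  | [] => []
  | d :: t => (d, 1 + ((t.takeWhile (fun x => x == d)).length : Int)) :: runsB (t.dropWhile (fun x => x == d))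
termination_by l => l.length
decreasing_by
  simp only [List.length_cons]
  exact Nat.lt_succ_of_le (List.length_dropWhile_le _ _)

-- reference run list, via a right fold
def rleStep (d : Int) (acc : List (Int × Int)) : List (Int × Int) :=
  match acc with
  | [] => [(d, 1)]
  | (v, c) :: rest => if d == v then (v, c + 1) :: rest else (d, 1) :: (v, c) :: rest

def rle (l : List Int) : List (Int × Int) := l.foldr rleStep []

-- recursive form of B's boundary merge
def combine : List (Int × Int) → List (Int × Int) → List (Int × Int)
  | [], R => R
  | [(v, c)], R =>
    match R with
    | [] => [(v, c)]
    | (w, e) :: rt => if v == w then (v, c + e) :: rt else (v, c) :: (w, e) :: rt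
  | p :: q :: L, R => p :: combine (q :: L) R

theorem runsFrom_eq (l : List Int) : ∀ (p c : Int),
    runsFrom p c l = (p, c + ((l.takeWhile (fun x => x == p)).length : Int)) :: runsB (l.dropWhile (fun x => x == p)) := by
  induction l with
  | nil => intro p c; simp [runsFrom, runsB]
  | cons d t ih =>
    intro p c
    by_cases h : d = p
    · subst h
      simp only [runsFrom, beq_self_eq_true, if_true, List.takeWhile, List.dropWhile, ih]
      congr 1
      simp
      omega
    · have hb : (d == p) = false := by simp [h]
      simp only [runsFrom, hb, List.takeWhile, List.dropWhile]
      simp only [runsB, ih]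
      simp

theorem foldA_eq (rest : List Int) : ∀ (prev count : Int) (acc : List String),
    (let s := rest.foldl
        (fun (st : List String × Int × Int) d =>
          if d == st.2.1 then (st.1, st.2.1, st.2.2 + 1)
          else (st.1 ++ ["[" ++ PySem.Int.toStr st.2.1 ++ "] *" ++ PySem.Int.toStr st.2.2], d, 1))
        (acc, prev, count)
     s.1 ++ ["[" ++ PySem.Int.toStr s.2.1 ++ "] *" ++ PySem.Int.toStr s.2.2])
    = acc ++ (runsFrom prev count rest).map (fun pc => pvFmt pc.1 pc.2) := by
  induction rest with
  | nil => intro prev count acc; simp [runsFrom, pvFmt]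
  | cons d t ih =>
    intro prev count acc
    by_cases h : (d == prev) = true
    · simp only [List.foldl_cons, h, if_true, runsFrom, ih]
    · simp only [List.foldl_cons, runsFrom, Bool.of_not_eq_true h, ih, pvFmt]
      simp

theorem runsB_cons (d : Int) (t : List Int) :
    runsB (d :: t) = (d, 1 + ((t.takeWhile (fun x => x == d)).length : Int)) :: runsB (t.dropWhile (fun x => x == d)) := by
  rw [runsB.eq_def]

theorem runsB_cons_step (d : Int) (t : List Int) : runsB (d :: t) = rleStep d (runsB t) := by
  cases t with
  | nil => simp [runsB, rleStep]
  | cons x t' =>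
    by_cases h : d = x
    · subst h
      rw [runsB_cons, runsB_cons]
      simp only [rleStep, List.takeWhile_cons, List.dropWhile_cons, beq_self_eq_true, if_true]
      congr 2 <;> (push_cast; ring)
    · have hb : (x == d) = false := by rw [beq_eq_false_iff_ne]; exact Ne.symm h
      have hb2 : (d == x) = false := by rw [beq_eq_false_iff_ne]; exact h
      rw [runsB_cons, runsB_cons]
      simp [List.takeWhile_cons, List.dropWhile_cons, hb, hb2, rleStep]
      exact runsB_cons x t'

theorem rle_eq_runsB (l : List Int) : rle l = runsB l := by
  induction l with
  | nil => simp [rle, runsB]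
  | cons d t ih =>
    show rleStep d (rle t) = _
    rw [ih, runsB_cons_step]

theorem rleStep_ne_nil (d : Int) (acc : List (Int × Int)) : rleStep d acc ≠ [] := by
  cases acc with
  | nil => simp [rleStep]
  | cons p rest =>
    obtain ⟨v, c⟩ := p
    by_cases h : d = v <;> simp [rleStep, h]

theorem rle_ne_nil (l : List Int) (h : l ≠ []) : rle l ≠ [] := by
  cases l with
  | nil => exact absurd rfl h
  | cons d t => exact rleStep_ne_nil d (rle t)

theorem step_combine (d : Int) (L R : List (Int × Int)) (hL : L ≠ []) :
    rleStep d (combine L R) = combine (rleStep d L) R := by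
  match L with
  | [] => exact absurd rfl hL
  | [(v, c)] =>
    cases R with
    | nil =>
      by_cases h : d = v
      · subst h; simp [combine, rleStep]
      · simp [combine, rleStep, h]
    | cons r rt =>
      obtain ⟨w, e⟩ := r
      by_cases hvw : v = w
      · subst hvw
        by_cases h : d = v
        · subst h
          simp only [combine, rleStep, beq_self_eq_true, if_true]
          congr 2
          omega
        · simp [combine, rleStep, h]
      · by_cases h : d = v
        · subst h; simp [combine, rleStep, hvw]
        · simp [combine, rleStep, h, hvw]
  | p :: q :: L' =>
    obtain ⟨v, c⟩ := p
    by_cases h : d = v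
    · subst h; simp [combine, rleStep]
    · simp [combine, rleStep, h]

theorem rle_append (x : List Int) : ∀ (y : List Int), x ≠ [] → y ≠ [] →
    rle (x ++ y) = combine (rle x) (rle y) := by
  induction x with
  | nil => intro y hx _; exact absurd rfl hx
  | cons d x' ih =>
    intro y _ hy
    cases hx' : x' with
    | nil =>
      subst hx'
      have : rle y ≠ [] := rle_ne_nil y hy
      obtain ⟨⟨w, e⟩, rt, hr⟩ : ∃ p rt, rle y = p :: rt := by
        cases h : rle y with
        | nil => exact absurd h this
        | cons p rt => exact ⟨p, rt, rfl⟩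
      show rleStep d (rle y) = combine (rleStep d (rle [])) (rle y)
      rw [hr]
      by_cases h : d = w
      · subst h
        simp only [rle, List.foldr_nil, rleStep, combine, beq_self_eq_true, if_true]
        congr 2
        omega
      · simp [rle, rleStep, combine, h]
    | cons a b =>
      rw [← hx']
      have hx'ne : x' ≠ [] := by simp [hx']
      show rleStep d (rle (x' ++ y)) = combine (rleStep d (rle x')) (rle y)
      rw [ih y hx'ne hy, step_combine d (rle x') (rle y) (rle_ne_nil x' hx'ne)]

-- B's inline merge expression equals combine (for nonempty halves)
theorem merge_eq_combine (L : List (Int × Int)) : ∀ (R : List (Int × Int)), L ≠ [] → R ≠ [] →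
    (let lp := L.getLastD (0, 0)
     let rp := R.headD (0, 0)
     if lp.1 == rp.1 then L.dropLast ++ [(lp.1, lp.2 + rp.2)] ++ R.tail
     else L ++ R) = combine L R := by
  induction L with
  | nil => intro R hL _; exact absurd rfl hL
  | cons p L' ih =>
    intro R _ hR
    obtain ⟨v, c⟩ := p
    cases L' with
    | nil =>
      cases R with
      | nil => exact absurd rfl hR
      | cons r rt =>
        obtain ⟨w, e⟩ := r
        by_cases h : v = w
        · subst h; simp [combine]
        · simp [combine, h]
    | cons q L'' =>
      have hne : q :: L'' ≠ [] := by simp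
      have := ih R hne hR
      simp only [combine, ← this]
      simp only [List.getLastD_eq_getLast?, List.getLast?_cons_cons,
        List.dropLast_cons_of_ne_nil hne]
      split_ifs <;> simp

theorem dc_step (l : List Int) (h : ¬ l.length ≤ 1)
    (ihl : dcRuns (l.take (l.length / 2)) = rle (l.take (l.length / 2)))
    (ihr : dcRuns (l.drop (l.length / 2)) = rle (l.drop (l.length / 2))) :
    dcRuns l = rle l := by
  rw [dcRuns]
  simp only [h, dif_neg, not_false_iff]
  have htake : l.take (l.length / 2) ≠ [] := by
    have hl : (l.take (l.length / 2)).length = l.length / 2 := by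
      rw [List.length_take]; omega
    intro he; rw [he] at hl; simp at hl; omega
  have hdrop : l.drop (l.length / 2) ≠ [] := by
    have hl : (l.drop (l.length / 2)).length = l.length - l.length / 2 := by
      rw [List.length_drop]
    intro he; rw [he] at hl; simp at hl; omega
  rw [ihl, ihr]
  have hm := merge_eq_combine (rle (l.take (l.length / 2))) (rle (l.drop (l.length / 2)))
    (rle_ne_nil _ htake) (rle_ne_nil _ hdrop)
  simp only at hm
  rw [hm, ← rle_append _ _ htake hdrop, List.take_append_drop]

theorem dcRuns_eq_rle (l : List Int) : dcRuns l = rle l := by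
  induction l using dcRuns.induct with
  | case1 l h =>
    rw [dcRuns]
    simp only [h, dif_pos]
    match l, h with
    | [], _ => simp [rle]
    | [d], _ => simp [rle, rleStep]
  | case2 l h mid left right lp rp hcond ihl ihr => exact dc_step l h ihl ihr
  | case3 l h mid left right lp rp hcond ihl ihr => exact dc_step l h ihl ihr

theorem degree_sequence_repr_eq_alt (degrees : List Int) :
    degree_sequence_repr degrees = degree_sequence_repr_alt degrees := by
  cases degrees with
  | nil => simp [degree_sequence_repr, degree_sequence_repr_alt, dcRuns,
      PySem.Str.join, PySem.Chars.join, List.intercalate]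
  | cons d0 rest =>
    show PySem.Str.join ", " _ = _
    rw [foldA_eq rest d0 1 []]
    unfold degree_sequence_repr_alt
    rw [dcRuns_eq_rle, rle_eq_runsB, runsFrom_eq rest d0 1]
    rw [runsB_cons]
    simp [pvFmt]

-- ===== VERDICT (by name: the statement is the Claim_ definition above) =====
theorem degree_sequence_repr_spec : Claim_equal_degree_sequence_repr := by
  intro degrees _
  exact degree_sequence_repr_eq_alt degrees
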